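-- pv_equiv track=rewrite | github.com/Nami3Piece/twitter-monitor | ai/engagement.py | _parse_versions
-- ===== SOURCE A (Python) =====
-- from typing import Dict, List, Optional
--
-- def _parse_versions(text: str) -> List[str]:
--     """Parse VERSION 1/2/3 format from Claude response"""
--     versions = []
--     lines = text.strip().split('\n')
--     current = []
--
--     for line in lines:
--         if line.startswith('VERSION'):
--             if current:
--                 versions.append('\n'.join(current).strip())
--                 current = []
--             # Extract text after "VERSION X:"
--             parts = line.split(':', 1)
--             if len(parts) > 1:
--                 current.append(parts[1].strip())
--         elif line.strip() and current:
--             current.append(line.strip())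
--
--     if current:
--         versions.append('\n'.join(current).strip())
--
--     # Ensure we have exactly 3 versions
--     while len(versions) < 3:
--         versions.append(versions[0] if versions else "")
--
--     return versions[:3]
-- ===== SOURCE B (Python) =====
-- from typing import List
--
--
-- def _parse_versions(text: str) -> List[str]:
--     """Parse VERSION 1/2/3 format: group lines into VERSION-headed blocks, then render each."""
--     lines = text.strip().split('\n')
--     # discard everything before the first VERSION marker
--     i = 0
--     while i < len(lines) and not lines[i].startswith('VERSION'):
--         i += 1
--     lines = lines[i:]
--     # group into (header, body) blocks
--     blocks = []
--     while lines:
--         header, rest = lines[0], lines[1:]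
--         body = []
--         while rest and not rest[0].startswith('VERSION'):
--             body.append(rest[0])
--             rest = rest[1:]
--         blocks.append((header, body))
--         lines = rest
--     # render each block whose header carries a colon
--     versions = []
--     for header, body in blocks:
--         parts = header.split(':', 1)
--         if len(parts) > 1:
--             pieces = [parts[1].strip()] + [s for s in (ln.strip() for ln in body) if s]
--             versions.append('\n'.join(pieces).strip())
--     # pad to exactly 3
--     if not versions:
--         return ['', '', '']
--     return (versions + [versions[0]] * (3 - len(versions)))[:3]
-- ===== Notes on version B (the rewrite author's own statement) =====
-- stated objective: alternative
-- what changed: Replaced the interleaved versions/current state machine by a two-phase decomposition: first group the lines into VERSION-headed blocks (discarding any prelude), then render each colon-carrying block to a string, and pad by a closed formula instead of a while loop.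
import Mathlib
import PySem

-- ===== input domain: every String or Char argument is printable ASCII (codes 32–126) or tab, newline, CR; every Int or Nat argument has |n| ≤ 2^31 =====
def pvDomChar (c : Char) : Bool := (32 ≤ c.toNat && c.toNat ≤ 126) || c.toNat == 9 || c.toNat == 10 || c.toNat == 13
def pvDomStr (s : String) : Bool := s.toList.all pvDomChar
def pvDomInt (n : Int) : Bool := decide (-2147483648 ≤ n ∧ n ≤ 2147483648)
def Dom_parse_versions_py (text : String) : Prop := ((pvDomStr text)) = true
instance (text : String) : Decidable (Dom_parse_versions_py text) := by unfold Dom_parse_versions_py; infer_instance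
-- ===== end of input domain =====

-- B replaces A's interleaved versions/current state machine by a two-phase decomposition
-- (group lines into VERSION-headed blocks, then render each block, pad by a formula); no speed claim.

-- ===== PORT A =====
-- loop body of A's `for line in lines` over the state (versions, current)
def pvStepA (st : List String × List String) (line : String) : List String × List String :=
  let versions := st.1
  let current := st.2
  if PySem.Str.startswith line "VERSION" then
    let versions := if !current.isEmpty then
        versions ++ [PySem.Str.strip (PySem.Str.join "\n" current)] else versions
    let parts := (PySem.Str.splitMax? line ":" 1).getD []
    if parts.length > 1 then
      (versions, [PySem.Str.strip ((PySem.List.pyGet? parts 1).getD "")])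
    else (versions, [])
  else if (!(PySem.Str.strip line == "")) && (!current.isEmpty) then
    (versions, current ++ [PySem.Str.strip line])
  else (versions, current)

-- A's trailing `while len(versions) < 3: versions.append(versions[0] if versions else "")`
def pvPadA (vs : List String) : List String :=
  if vs.length < 3 then
    pvPadA (vs ++ [if vs.isEmpty then "" else (PySem.List.pyGet? vs 0).getD ""])
  else vs
termination_by 3 - vs.length
decreasing_by simp only [List.length_append, List.length_cons, List.length_nil]; omega

def parse_versions_py (text : String) : List String :=
  let lines := (PySem.Str.split? (PySem.Str.strip text) "\n").getD []
  let st := lines.foldl pvStepA ([], [])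
  let versions := if !st.2.isEmpty then
      st.1 ++ [PySem.Str.strip (PySem.Str.join "\n" st.2)] else st.1
  PySem.List.slice (pvPadA versions) none (some 3)

-- ===== PORT B =====
-- a line that is NOT a VERSION marker
def pvNonV (s : String) : Bool := !PySem.Str.startswith s "VERSION"

-- group the lines into (header, body) blocks, each headed by a VERSION line
def pvBlocks : List String → List (String × List String)
  | [] => []
  | l :: rest => (l, rest.takeWhile pvNonV) :: pvBlocks (rest.dropWhile pvNonV)
termination_by ls => ls.length
decreasing_by
  have := List.length_dropWhile_le pvNonV rest
  simp only [List.length_cons]; omega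

-- render one block: seed from after the first colon, then the stripped non-empty body lines
def pvRender (b : String × List String) : Option String :=
  let parts := (PySem.Str.splitMax? b.1 ":" 1).getD []
  if parts.length > 1 then
    some (PySem.Str.strip (PySem.Str.join "\n"
      (PySem.Str.strip ((PySem.List.pyGet? parts 1).getD "") ::
        (b.2.map PySem.Str.strip).filter (fun s => !(s == "")))))
  else none

def parse_versions_py_alt (text : String) : List String :=
  let lines := (PySem.Str.split? (PySem.Str.strip text) "\n").getD []
  let vs := (pvBlocks (lines.dropWhile pvNonV)).filterMap pvRender
  match vs with
  | [] => ["", "", ""]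
  | v :: _ => (vs ++ List.replicate (3 - vs.length) v).take 3

-- ===== PRECONDITION & SPEC =====
def Spec_parse_versions_py (text : String) (out : List String) : Prop := out = parse_versions_py_alt text
instance (text : String) (out : List String) : Decidable (Spec_parse_versions_py text out) := by unfold Spec_parse_versions_py; infer_instance

-- ===== CLAIM (what is proved, stated in full; the proofs are below) =====
def Claim_equal_parse_versions_py : Prop := ∀ (text : String), Dom_parse_versions_py text → Spec_parse_versions_py text (parse_versions_py text)

-- ===== LEMMAS AND PROOFS =====

-- A's `current` flushed to a (possibly empty) versions contribution
def pvFlush (cur : List String) : List String :=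
  if cur.isEmpty then [] else [PySem.Str.strip (PySem.Str.join "\n" cur)]

-- effect of a run of non-VERSION body lines on A's `current`
def pvExtend (cur : List String) (body : List String) : List String :=
  if cur.isEmpty then [] else cur ++ (body.map PySem.Str.strip).filter (fun s => !(s == ""))

lemma pvFlush_if (vs cur : List String) :
    (if !cur.isEmpty then vs ++ [PySem.Str.strip (PySem.Str.join "\n" cur)] else vs) =
      vs ++ pvFlush cur := by
  cases cur <;> simp [pvFlush]

lemma pvExtend_nil (cur : List String) : pvExtend cur [] = cur := by
  unfold pvExtend; cases cur <;> simp

lemma pvExtend_nilcur (body : List String) : pvExtend [] body = [] := by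
  simp [pvExtend]

lemma pvFlush_nil : pvFlush [] = [] := by simp [pvFlush]

lemma pvExtend_cons (cur : List String) (l : String) (body : List String) :
    pvExtend cur (l :: body) =
      pvExtend (if (!(PySem.Str.strip l == "")) && (!cur.isEmpty) then
        cur ++ [PySem.Str.strip l] else cur) body := by
  cases cur with
  | nil => simp [pvExtend]
  | cons a t =>
    by_cases h : PySem.Str.strip l = ""
    · simp [pvExtend, h]
    · simp [pvExtend, h]

lemma pvFilterMap_cons_toList {α β : Type} (f : α → Option β) (x : α) (xs : List α) :
    List.filterMap f (x :: xs) = (f x).toList ++ List.filterMap f xs := by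
  cases h : f x <;> simp [h]

lemma pvRender_toList (l : String) (b : List String) :
    (pvRender (l, b)).toList =
      pvFlush (pvExtend
        (if ((PySem.Str.splitMax? l ":" 1).getD []).length > 1 then
          [PySem.Str.strip ((PySem.List.pyGet? ((PySem.Str.splitMax? l ":" 1).getD []) 1).getD "")]
         else []) b) := by
  by_cases h : ((PySem.Str.splitMax? l ":" 1).getD []).length > 1
  · simp [pvRender, pvExtend, pvFlush, h]
  · simp [pvRender, pvExtend, pvFlush, h]

-- the central invariant: running A's loop from (vs, cur) and flushing equals vs, plus
-- the flush of cur extended by the leading body lines, plus B's per-block rendering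
lemma pvMain (lines : List String) : ∀ (vs cur : List String),
    (lines.foldl pvStepA (vs, cur)).1 ++ pvFlush (lines.foldl pvStepA (vs, cur)).2 =
      vs ++ pvFlush (pvExtend cur (lines.takeWhile pvNonV)) ++
        (pvBlocks (lines.dropWhile pvNonV)).filterMap pvRender := by
  induction lines with
  | nil => intro vs cur; simp [pvBlocks, pvExtend_nil]
  | cons l ls ih =>
    intro vs cur
    cases hv : PySem.Str.startswith l "VERSION" with
    | true =>
      have hnv : pvNonV l = false := by unfold pvNonV; rw [hv]; rfl
      have hstep : pvStepA (vs, cur) l =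
          (vs ++ pvFlush cur,
            if ((PySem.Str.splitMax? l ":" 1).getD []).length > 1 then
              [PySem.Str.strip ((PySem.List.pyGet? ((PySem.Str.splitMax? l ":" 1).getD []) 1).getD "")]
            else []) := by
        simp only [pvStepA, hv, if_true, pvFlush_if]
        split <;> rfl
      clear hv
      rw [List.foldl_cons, hstep, ih]
      rw [List.takeWhile_cons_of_neg (by simp [hnv]), List.dropWhile_cons_of_neg (by simp [hnv])]
      rw [pvBlocks, pvFilterMap_cons_toList, pvRender_toList, pvExtend_nil]
      simp [List.append_assoc]
    | false =>
      have hnv : pvNonV l = true := by unfold pvNonV; rw [hv]; rfl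
      have hstep : pvStepA (vs, cur) l =
          (vs, if (!(PySem.Str.strip l == "")) && (!cur.isEmpty) then
            cur ++ [PySem.Str.strip l] else cur) := by
        simp only [pvStepA, hv, if_false, Bool.false_eq_true]
        split <;> rfl
      rw [List.foldl_cons, hstep, ih]
      rw [List.takeWhile_cons_of_pos hnv, List.dropWhile_cons_of_pos hnv, pvExtend_cons]

lemma pvSlice3 (xs : List String) : PySem.List.slice xs none (some 3) = xs.take 3 := by
  rw [PySem.List.slice_to xs (by omega : (0:Int) ≤ 3)]; rfl

-- padding: A's while-loop + [:3] equals B's closed-form padding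
lemma pvPad_eq (vs : List String) :
    PySem.List.slice (pvPadA vs) none (some 3) =
      (match vs with
       | [] => ["", "", ""]
       | v :: _ => (vs ++ List.replicate (3 - vs.length) v).take 3) := by
  match vs with
  | [] =>
    rw [pvPadA]; rw [pvPadA]; rw [pvPadA]; rw [pvPadA]
    simp [pvSlice3]
  | [a] =>
    rw [pvPadA]; rw [pvPadA]; rw [pvPadA]
    simp [PySem.List.pyGet?, PySem.List.pyIdx?, pvSlice3]
  | [a, b] =>
    rw [pvPadA]; rw [pvPadA]
    simp [PySem.List.pyGet?, PySem.List.pyIdx?, pvSlice3]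
  | a :: b :: c :: t =>
    have h : ¬ (a :: b :: c :: t).length < 3 := by simp
    rw [pvPadA, if_neg h, pvSlice3]
    simp

-- ===== VERDICT (by name: the statement is the Claim_ definition above) =====
theorem parse_versions_py_spec : Claim_equal_parse_versions_py := by
  intro text _
  unfold Spec_parse_versions_py parse_versions_py parse_versions_py_alt
  simp only [pvFlush_if]
  rw [pvMain, pvExtend_nilcur, pvFlush_nil]
  simp only [List.nil_append]
  rw [pvPad_eq]
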